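-- pv_equiv track=rewrite | github.com/Fvegini/Pokemon-Shuffle-Move-Helper | app/src/tapper_utils.py | replace_strings_with_numbers
-- ===== SOURCE A (Python) =====
-- def replace_strings_with_numbers(strings):
--     replacement_dict = {}
--     replacement_list = []
--     counter = 1
--
--     for s in strings:
--         if s == "Air":
--             replacement_list.append(-1)
--             if "Air" not in replacement_dict:
--                 replacement_dict["Air"] = -1
--         elif s in ["Wood", "Metal", "Stage_Added", "Fog"]:
--             replacement_list.append(0)
--             if "Disruption" not in replacement_dict:
--                 replacement_dict["Disruption"] = 0
--         else:
--             if s not in replacement_dict: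
--                 replacement_dict[s] = counter
--                 counter += 1
--             replacement_list.append(replacement_dict[s])
--
--     return replacement_list, replacement_dict
-- ===== SOURCE B (Python) =====
-- DISRUPTIONS = ("Wood", "Metal", "Stage_Added", "Fog")
--
-- def replace_strings_with_numbers(strings):
--     # Pass 1: build the replacement table alone.
--     replacement_dict = {}
--     counter = 1
--     for s in strings:
--         if s == "Air":
--             if "Air" not in replacement_dict:
--                 replacement_dict["Air"] = -1
--         elif s in DISRUPTIONS:
--             if "Disruption" not in replacement_dict:
--                 replacement_dict["Disruption"] = 0
--         elif s not in replacement_dict: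
--             replacement_dict[s] = counter
--             counter += 1
--     # Pass 2: map every string through the finished table.
--     replacement_list = [
--         -1 if s == "Air" else 0 if s in DISRUPTIONS else replacement_dict[s]
--         for s in strings
--     ]
--     return replacement_list, replacement_dict
-- ===== Notes on version B (the rewrite author's own statement) =====
-- stated objective: alternative
-- what changed: Splits A's single fused loop into two passes: one loop builds only the replacement table (dict + counter), then a comprehension maps each string through the finished table, relying on the fact that values are never overwritten.
import Mathlib
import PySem

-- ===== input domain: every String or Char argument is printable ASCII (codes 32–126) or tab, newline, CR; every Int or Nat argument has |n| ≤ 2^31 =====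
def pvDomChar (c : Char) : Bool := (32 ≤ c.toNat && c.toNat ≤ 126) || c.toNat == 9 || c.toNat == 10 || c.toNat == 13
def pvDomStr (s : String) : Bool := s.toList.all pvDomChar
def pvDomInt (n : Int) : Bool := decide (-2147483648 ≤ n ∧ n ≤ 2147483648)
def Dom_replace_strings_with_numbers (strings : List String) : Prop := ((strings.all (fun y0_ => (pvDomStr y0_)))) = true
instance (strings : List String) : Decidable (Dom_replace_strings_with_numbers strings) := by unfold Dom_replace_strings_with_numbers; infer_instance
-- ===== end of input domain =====

-- B splits A's fused loop into two passes: one loop builds only the table, then the list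
-- is produced by mapping each string through the finished table (alternative decomposition).

-- ===== PORT A =====
-- A's single loop over `strings`, carrying (dict, list, counter).
def aLoop (ss : List String) (d : PySem.Dict String Int) (l : List Int) (c : Int) :
    List Int × (List (String × Int)) :=
  match ss with
  | [] => (l, d.items)
  | s :: rest =>
    if s = "Air" then
      aLoop rest (if d.contains "Air" then d else d.insert "Air" (-1)) (l ++ [-1]) c
    else if s = "Wood" ∨ s = "Metal" ∨ s = "Stage_Added" ∨ s = "Fog" then
      aLoop rest (if d.contains "Disruption" then d else d.insert "Disruption" 0) (l ++ [0]) c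
    else
      if d.contains s then
        -- key present: replacement_dict[s] (0 default unreachable, key is present)
        aLoop rest d (l ++ [d.getD s 0]) c
      else
        aLoop rest (d.insert s c) (l ++ [c]) (c + 1)

def replace_strings_with_numbers (strings : List String) : List Int × (List (String × Int)) :=
  aLoop strings PySem.Dict.empty [] 1

-- ===== PORT B =====
-- Pass 1: build the table alone (dict and counter).
def bTable (ss : List String) (d : PySem.Dict String Int) (c : Int) : PySem.Dict String Int × Int :=
  match ss with
  | [] => (d, c)
  | s :: rest =>
    if s = "Air" then
      bTable rest (if d.contains "Air" then d else d.insert "Air" (-1)) c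
    else if s = "Wood" ∨ s = "Metal" ∨ s = "Stage_Added" ∨ s = "Fog" then
      bTable rest (if d.contains "Disruption" then d else d.insert "Disruption" 0) c
    else if d.contains s then
      bTable rest d c
    else
      bTable rest (d.insert s c) (c + 1)

-- Pass 2: map one string through the finished table.
def bMap (d : PySem.Dict String Int) (s : String) : Int :=
  if s = "Air" then -1
  else if s = "Wood" ∨ s = "Metal" ∨ s = "Stage_Added" ∨ s = "Fog" then 0
  else d.getD s 0

def replace_strings_with_numbers_alt (strings : List String) : List Int × (List (String × Int)) :=
  let d := (bTable strings PySem.Dict.empty 1).1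
  (strings.map (bMap d), d.items)

-- ===== PRECONDITION & SPEC =====
def Spec_replace_strings_with_numbers (strings : List String) (out : List Int × (List (String × Int))) : Prop := out = replace_strings_with_numbers_alt strings
instance (strings : List String) (out : List Int × (List (String × Int))) : Decidable (Spec_replace_strings_with_numbers strings out) := by unfold Spec_replace_strings_with_numbers; infer_instance

-- ===== CLAIM (what is proved, stated in full; the proofs are below) =====
def Claim_equal_replace_strings_with_numbers : Prop := ∀ (strings : List String), Dom_replace_strings_with_numbers strings → Spec_replace_strings_with_numbers strings (replace_strings_with_numbers strings)

-- ===== LEMMAS AND PROOFS =====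

-- Inserting a key that is absent does not disturb any existing binding.
theorem insert_get?_preserve (d : PySem.Dict String Int) (a : String) (w : Int)
    (k : String) (v : Int) (hk : d.get? k = some v) (ha : d.contains a = false) :
    (d.insert a w).get? k = some v := by
  rw [PySem.Dict.get?_insert]
  split_ifs with h
  · subst h
    rw [PySem.Dict.contains_eq_isSome_get?, hk] at ha
    simp at ha
  · exact hk

-- bTable only adds fresh keys, so an existing binding survives to the final table.
theorem bTable_get?_stable (ss : List String) (d : PySem.Dict String Int) (c : Int)
    (k : String) (v : Int) (h : d.get? k = some v) :
    (bTable ss d c).1.get? k = some v := by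
  induction ss generalizing d c with
  | nil => simpa [bTable] using h
  | cons s rest ih =>
    unfold bTable
    split_ifs with h1 h2 h3 h4 h5 h6 <;>
      first
        | exact ih _ _ h
        | exact ih _ _ (insert_get?_preserve d _ _ k v h (by simp_all))

-- A's fused loop equals: B's table, then B's map, with the accumulated list in front.
theorem aLoop_eq (ss : List String) (d : PySem.Dict String Int) (l : List Int) (c : Int) :
    aLoop ss d l c = (l ++ ss.map (bMap (bTable ss d c).1), (bTable ss d c).1.items) := by
  induction ss generalizing d l c with
  | nil => simp [aLoop, bTable]
  | cons s rest ih =>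
    unfold aLoop bTable
    split_ifs with h1 h2 h3 h4 h5 h6
    all_goals rw [ih]
    · -- s = "Air", dict already has it
      subst h1; simp [bMap]
    · subst h1; simp [bMap]
    · -- disruption word
      simp [bMap, h1, h3]
    · simp [bMap, h1, h3]
    · -- ordinary word already in the table
      obtain ⟨v, hv⟩ : ∃ v, d.get? s = some v := by
        rw [PySem.Dict.contains_eq_isSome_get?] at h5
        cases hg : d.get? s with
        | none => rw [hg] at h5; simp at h5
        | some v => exact ⟨v, rfl⟩
      have hstab := bTable_get?_stable rest d c s v hv
      simp [bMap, h1, h3, PySem.Dict.getD_eq_get?_getD, hv, hstab]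
    · -- fresh ordinary word: gets the current counter
      have hself : (d.insert s c).get? s = some c := PySem.Dict.get?_insert_self d s c
      have hstab := bTable_get?_stable rest (d.insert s c) (c + 1) s c hself
      simp [bMap, h1, h3, PySem.Dict.getD_eq_get?_getD, hstab]

-- ===== VERDICT (by name: the statement is the Claim_ definition above) =====
theorem replace_strings_with_numbers_spec : Claim_equal_replace_strings_with_numbers := by
  intro strings _
  unfold Spec_replace_strings_with_numbers replace_strings_with_numbers replace_strings_with_numbers_alt
  exact aLoop_eq strings PySem.Dict.empty [] 1
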